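-- pv_equiv track=rewrite | github.com/b01lers/b01lers-ctf-2020 | rev/300_hypercomputer/sol/sol-full.py | fsum
-- ===== SOURCE A (Python) =====
-- def fsum(a, b):
--    vals = []
--    for i in range(16):
--       if (b & 1) == 0:
--          vals.append(a)
--       else:
--          vals.append(b)
--       b //= 2
--    return sum(vals)
-- ===== SOURCE B (Python) =====
-- def fsum(a, b):
--     # Closed-form constant part: each of the 16 low bit positions that is zero
--     # contributes a.  Then walk only the SET bits of the 16-bit residue, from the
--     # highest down, via bit_length, adding the shifted b for each.
--     m = b % 0x10000                       # low 16 bits of b, as a nonnegative residue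
--     total = a * (16 - bin(m).count("1"))
--     while m:
--         i = m.bit_length() - 1            # index of the highest remaining set bit
--         total += b >> i
--         m -= 1 << i
--     return total
-- ===== Notes on version B (the rewrite author's own statement) =====
-- stated objective: alternative
-- what changed: A builds a 16-element list by scanning all 16 positions of a successively halved b and sums it; B never scans positions: it takes the closed-form constant term a*(16 - popcount(b % 2**16)) for the zero bits and then iterates only over the SET bits of the 16-bit residue, extracting the highest set bit with bit_length and clearing it, adding b >> i for each.
import Mathlib
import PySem

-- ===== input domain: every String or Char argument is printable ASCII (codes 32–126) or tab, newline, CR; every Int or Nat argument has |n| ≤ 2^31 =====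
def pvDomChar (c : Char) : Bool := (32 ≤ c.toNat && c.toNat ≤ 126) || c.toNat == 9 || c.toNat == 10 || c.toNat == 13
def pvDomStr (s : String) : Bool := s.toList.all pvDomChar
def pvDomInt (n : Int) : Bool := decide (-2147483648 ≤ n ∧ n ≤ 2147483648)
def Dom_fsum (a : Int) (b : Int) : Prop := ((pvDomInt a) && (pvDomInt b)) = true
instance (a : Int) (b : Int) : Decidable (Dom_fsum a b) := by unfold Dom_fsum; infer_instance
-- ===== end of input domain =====

-- B replaces A's 16-position scan (list building with b //= 2) by a closed-form
-- constant term for the zero bits plus a walk over only the SET bits of b % 2^16,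
-- extracted highest-first via bit_length; objective: alternative decomposition.

-- ===== PORT A =====
-- loop body of A: append a or the current b to vals, then b //= 2
def fsumStep (a : Int) (st : List Int × Int) (_i : Int) : List Int × Int :=
  if PySem.Int.band st.2 1 = 0 then (st.1 ++ [a], PySem.Int.floordiv st.2 2)
  else (st.1 ++ [st.2], PySem.Int.floordiv st.2 2)

def fsum (a : Int) (b : Int) : Int :=
  ((PySem.List.pyRange 0 16 1).foldl (fsumStep a) ([], b)).1.sum

-- ===== PORT B =====
-- bin(m).count("1"): the number of '1' digits of m in binary, digit by digit (exact for m ≥ 0)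
def popCount (m : Nat) : Nat :=
  if h : m = 0 then 0 else m % 2 + popCount (m / 2)
decreasing_by exact Nat.div_lt_self (Nat.pos_of_ne_zero h) (by omega)

-- the while loop: i = m.bit_length() - 1 (= Nat.log2 m for m > 0, exact),
-- total += b >> i, m -= 1 << i
def fsumAltLoop (b : Int) (m : Nat) (total : Int) : Int :=
  if h : m = 0 then total
  else fsumAltLoop b (m - 2 ^ m.log2) (total + b >>> m.log2)
termination_by m
decreasing_by
  exact Nat.sub_lt (Nat.pos_of_ne_zero h) (Nat.one_le_two_pow)

def fsum_alt (a : Int) (b : Int) : Int :=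
  let m : Nat := (PySem.Int.mod b 65536).toNat   -- b % 0x10000, a nonnegative residue
  fsumAltLoop b m (a * (16 - (popCount m : Int)))

-- ===== PRECONDITION & SPEC =====
def Spec_fsum (a : Int) (b : Int) (out : Int) : Prop := out = fsum_alt a b
instance (a : Int) (b : Int) (out : Int) : Decidable (Spec_fsum a b out) := by unfold Spec_fsum; infer_instance

-- ===== CLAIM (what is proved, stated in full; the proofs are below) =====
def Claim_equal_fsum : Prop := ∀ (a : Int) (b : Int), Dom_fsum a b → Spec_fsum a b (fsum a b)

-- ===== LEMMAS AND PROOFS =====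

-- the value A's iteration i contributes: a on a zero bit, the shifted b on a one bit
def fsumTerm (a b : Int) (i : Nat) : Int :=
  if PySem.Int.band (b >>> i) 1 = 0 then a else b >>> i

theorem floordiv_two_eq_shift (b : Int) : PySem.Int.floordiv b 2 = b >>> (1:Nat) := by
  rw [Int.shiftRight_eq_div_pow]
  simp [PySem.Int.floordiv, Int.fdiv_eq_ediv]

theorem shift_one_shift (b : Int) (i : Nat) : (b >>> (1:Nat)) >>> i = b >>> (1+i) := by
  rw [← Int.shiftRight_add]

theorem fsumTerm_shift (a b : Int) (i : Nat) :
    fsumTerm a (b >>> (1:Nat)) i = fsumTerm a b (1+i) := by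
  simp [fsumTerm, shift_one_shift]

theorem fsum_loop (a : Int) (l : List Int) (b : Int) (acc : List Int) :
    (l.foldl (fsumStep a) (acc, b)).1.sum
      = acc.sum + ((List.range l.length).map (fsumTerm a b)).sum := by
  induction l generalizing b acc with
  | nil => simp
  | cons x xs ih =>
    rw [List.foldl_cons]
    have hstep : fsumStep a (acc, b) x
        = (acc ++ [fsumTerm a b 0], b >>> (1:Nat)) := by
      unfold fsumStep
      rw [floordiv_two_eq_shift]
      by_cases h : PySem.Int.band b 1 = 0 <;> simp [fsumTerm, h]
    rw [hstep, ih, List.map_congr_left (fun i _ => fsumTerm_shift a b i)]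
    simp [List.range_succ_eq_map, List.map_map, Function.comp_def]
    ring

theorem sum_map_range (f : Nat → Int) (n : Nat) :
    ((List.range n).map f).sum = ∑ j ∈ Finset.range n, f j := by
  induction n with
  | zero => simp
  | succ m ih => simp [List.range_succ, Finset.sum_range_succ, ih]

theorem band_one_cases (x : Int) : PySem.Int.band x 1 = 0 ∨ PySem.Int.band x 1 = 1 := by
  rw [PySem.Int.band_one]
  exact PySem.Int.mod_two_eq x

-- the bit of b at position j, seen through the residue (b % 65536).toNat
theorem testBit_residue (b : Int) (j : Nat) (hj : j < 16) :
    ((PySem.Int.mod b 65536).toNat).testBit j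
      = decide (PySem.Int.band (b >>> j) 1 = 1) := by
  have hmod : PySem.Int.mod b 65536 = b % 65536 := by simp [PySem.Int.mod, Int.fmod_eq_emod]
  rw [PySem.Int.band_one]
  have h2 : PySem.Int.mod (b >>> j) 2 = (b >>> j) % 2 := by
    simp [PySem.Int.mod, Int.fmod_eq_emod]
  rw [h2, hmod]
  set r : Int := b % 65536 with hr
  have hr0 : 0 ≤ r := Int.emod_nonneg b (by norm_num)
  have hq : b = r + 65536 * (b / 65536) := by
    have := Int.mul_ediv_add_emod b 65536
    omega
  have hcast : ((2 ^ j : Nat) : Int) = 2 ^ j := by push_cast; ring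
  have hshift : b >>> j = r / 2 ^ j + 2 ^ (16 - j) * (b / 65536) := by
    rw [Int.shiftRight_eq_div_pow, hcast]
    conv_lhs => rw [hq]
    have h65536 : (65536 : Int) * (b / 65536) = 2 ^ j * (2 ^ (16 - j) * (b / 65536)) := by
      have hjj : j + (16 - j) = 16 := by omega
      rw [← mul_assoc, ← pow_add, hjj]
      norm_num
    rw [h65536, Int.add_mul_ediv_left _ _ (by positivity)]
  have hpar : (b >>> j) % 2 = (r / 2 ^ j) % 2 := by
    rw [hshift]
    have h16 : (2 : Int) ^ (16 - j) * (b / 65536) = 2 * (2 ^ (15 - j) * (b / 65536)) := by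
      have hjj : 15 - j + 1 = 16 - j := by omega
      rw [← mul_assoc, ← pow_succ', hjj]
    rw [h16]
    omega
  rw [hpar]
  have hrn : ((r.toNat : Nat) : Int) = r := Int.toNat_of_nonneg hr0
  have hdm : ((r.toNat / 2 ^ j % 2 : Nat) : Int) = r / 2 ^ j % 2 := by
    push_cast [Int.natCast_div, Int.natCast_mod, hrn]
    norm_cast
  rw [Nat.testBit_eq_decide_div_mod_eq]
  simp only [decide_eq_decide]
  omega

-- A's total written over the residue's bits
theorem fsum_eq_bitsum (a b : Int) :
    fsum a b = ∑ j ∈ Finset.range 16,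
      (if ((PySem.Int.mod b 65536).toNat).testBit j then b >>> j else a) := by
  unfold fsum
  rw [fsum_loop]
  have hlen : (PySem.List.pyRange 0 16 1).length = 16 := by decide
  rw [hlen, List.sum_nil, zero_add, sum_map_range]
  apply Finset.sum_congr rfl
  intro j hj
  rw [testBit_residue b j (Finset.mem_range.mp hj)]
  unfold fsumTerm
  rcases band_one_cases (b >>> j) with h | h <;> simp [h]

theorem popCount_eq (k : Nat) : ∀ n, n < 2 ^ k →
    popCount n = ∑ j ∈ Finset.range k, (if n.testBit j then 1 else 0) := by
  induction k with
  | zero =>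
    intro n hn
    interval_cases n
    simp [popCount]
  | succ k ih =>
    intro n hn
    by_cases h0 : n = 0
    · subst h0
      simp [popCount, Nat.zero_testBit]
    · rw [popCount, dif_neg h0, Finset.sum_range_succ']
      have hdiv : n / 2 < 2 ^ k := by
        have h2 : 2 ^ (k + 1) = 2 * 2 ^ k := by ring
        omega
      rw [ih (n / 2) hdiv]
      have hb : ∀ j, n.testBit (j + 1) = (n / 2).testBit j := by
        intro j
        rw [← Nat.testBit_div_two]
      simp only [hb, Nat.testBit_zero]
      have : (if decide (n % 2 = 1) = true then 1 else 0) = n % 2 := by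
        rcases Nat.mod_two_eq_zero_or_one n with h | h <;> simp [h]
      omega

-- bits of n - 2^(log2 n): bit log2 n cleared, the others unchanged
theorem testBit_sub_top (n : Nat) (hn : n ≠ 0) (j : Nat) (hj : j ≠ n.log2) :
    (n - 2 ^ n.log2).testBit j = n.testBit j := by
  set i := n.log2 with hi
  have h1 : 2 ^ i ≤ n := Nat.log2_self_le hn
  have h2 : n < 2 ^ (i + 1) := Nat.lt_log2_self
  rcases Nat.lt_or_ge j i with hlt | hge
  · rw [Nat.testBit_eq_decide_div_mod_eq, Nat.testBit_eq_decide_div_mod_eq]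
    have hsplit : n / 2 ^ j = (n - 2 ^ i) / 2 ^ j + 2 ^ (i - j) := by
      have heq : n = (n - 2 ^ i) + 2 ^ j * 2 ^ (i - j) := by
        have : 2 ^ j * 2 ^ (i - j) = 2 ^ i := by
          rw [← pow_add]; congr 1; omega
        omega
      conv_lhs => rw [heq]
      rw [Nat.add_mul_div_left _ _ (by positivity)]
    have heven : 2 ^ (i - j) % 2 = 0 := by
      have : i - j = (i - j - 1) + 1 := by omega
      rw [this, pow_succ]
      omega
    rw [hsplit]
    simp only [decide_eq_decide]
    omega
  · have hgt : i < j := by omega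
    rw [Nat.testBit_eq_false_of_lt, Nat.testBit_eq_false_of_lt]
    · calc n < 2 ^ (i + 1) := h2
        _ ≤ 2 ^ j := Nat.pow_le_pow_right (by omega) (by omega)
    · calc n - 2 ^ i < 2 ^ (i + 1) := by omega
        _ ≤ 2 ^ j := Nat.pow_le_pow_right (by omega) (by omega)

theorem testBit_log2_self (n : Nat) (hn : n ≠ 0) : n.testBit n.log2 = true := by
  have h1 : 2 ^ n.log2 ≤ n := Nat.log2_self_le hn
  have h2 : n < 2 ^ (n.log2 + 1) := Nat.lt_log2_self
  have h3 : 2 ^ (n.log2 + 1) = 2 * 2 ^ n.log2 := by ring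
  rw [Nat.testBit_eq_decide_div_mod_eq]
  have : n / 2 ^ n.log2 = 1 :=
    Nat.div_eq_of_lt_le (by omega) (by omega)
  simp [this]

theorem testBit_sub_top_self (n : Nat) (hn : n ≠ 0) :
    (n - 2 ^ n.log2).testBit n.log2 = false := by
  apply Nat.testBit_eq_false_of_lt
  have h2 : n < 2 ^ (n.log2 + 1) := Nat.lt_log2_self
  have h3 : 2 ^ (n.log2 + 1) = 2 * 2 ^ n.log2 := by ring
  omega

theorem fsumAltLoop_eq (b : Int) (n : Nat) (h : n < 2 ^ 16) (total : Int) :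
    fsumAltLoop b n total
      = total + ∑ j ∈ Finset.range 16, (if n.testBit j then b >>> j else 0) := by
  induction n using Nat.strong_induction_on generalizing total with
  | _ n ih =>
    by_cases h0 : n = 0
    · subst h0
      simp [fsumAltLoop, Nat.zero_testBit]
    · rw [fsumAltLoop, dif_neg h0]
      set i := n.log2 with hi
      have hilt : i < 16 := by
        rw [hi]
        exact (Nat.log2_lt h0).mpr h
      have hlt : n - 2 ^ i < n :=
        Nat.sub_lt (Nat.pos_of_ne_zero h0) Nat.one_le_two_pow
      rw [ih _ hlt (by omega)]
      have hmem : i ∈ Finset.range 16 := Finset.mem_range.mpr hilt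
      rw [← Finset.add_sum_erase _ _ hmem, ← Finset.add_sum_erase _ _ hmem]
      rw [testBit_log2_self n h0, testBit_sub_top_self n h0]
      have hcong : ∑ j ∈ (Finset.range 16).erase i,
            (if (n - 2 ^ i).testBit j then b >>> j else 0)
          = ∑ j ∈ (Finset.range 16).erase i, (if n.testBit j then b >>> j else 0) := by
        apply Finset.sum_congr rfl
        intro j hjmem
        rw [testBit_sub_top n h0 j (Finset.ne_of_mem_erase hjmem)]
      rw [hcong]
      simp
      ring

theorem sum_else_const (c : Nat → Bool) (a : Int) (pc : Nat)
    (hpc : pc = ∑ j ∈ Finset.range 16, (if c j then 1 else 0)) :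
    ∑ j ∈ Finset.range 16, (if c j then 0 else a) = a * (16 - (pc : Int)) := by
  have hcast : (pc : Int) = ∑ j ∈ Finset.range 16, (if c j then (1 : Int) else 0) := by
    rw [hpc]
    push_cast
    ring
  have hterm : ∀ j, (if c j then (0:Int) else a) = a - a * (if c j then (1:Int) else 0) := by
    intro j
    by_cases h : c j <;> simp [h]
  calc ∑ j ∈ Finset.range 16, (if c j then (0:Int) else a)
      = ∑ j ∈ Finset.range 16, (a - a * (if c j then (1:Int) else 0)) :=
        Finset.sum_congr rfl (fun j _ => hterm j)
    _ = (∑ _j ∈ Finset.range 16, a) - a * ∑ j ∈ Finset.range 16, (if c j then (1:Int) else 0) := by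
        rw [Finset.sum_sub_distrib, Finset.mul_sum]
    _ = a * (16 - (pc : Int)) := by
        rw [← hcast, Finset.sum_const, Finset.card_range]
        ring

theorem fsum_eq_alt (a b : Int) : fsum a b = fsum_alt a b := by
  unfold fsum_alt
  set n : Nat := (PySem.Int.mod b 65536).toNat with hn
  have hmod : PySem.Int.mod b 65536 = b % 65536 := by simp [PySem.Int.mod, Int.fmod_eq_emod]
  have hnlt : n < 2 ^ 16 := by
    have h1 : b % 65536 < 65536 := Int.emod_lt_of_pos b (by norm_num)
    have h2 : (2 : Nat) ^ 16 = 65536 := by norm_num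
    omega
  rw [fsumAltLoop_eq b n hnlt]
  rw [fsum_eq_bitsum a b, ← hn]
  have hsplit : ∀ j, (if n.testBit j then b >>> j else a)
      = (if n.testBit j then b >>> j else 0) + (if n.testBit j then 0 else a) := by
    intro j
    split_ifs <;> ring
  calc ∑ j ∈ Finset.range 16, (if n.testBit j then b >>> j else a)
      = ∑ j ∈ Finset.range 16,
          ((if n.testBit j then b >>> j else 0) + (if n.testBit j then 0 else a)) :=
        Finset.sum_congr rfl (fun j _ => hsplit j)
    _ = (∑ j ∈ Finset.range 16, (if n.testBit j then b >>> j else 0))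
          + ∑ j ∈ Finset.range 16, (if n.testBit j then 0 else a) := by
        rw [Finset.sum_add_distrib]
    _ = a * (16 - (popCount n : Int))
          + ∑ j ∈ Finset.range 16, (if n.testBit j then b >>> j else 0) := by
        rw [sum_else_const (fun j => n.testBit j) a (popCount n) (popCount_eq 16 n hnlt)]
        ring

-- ===== VERDICT (by name: the statement is the Claim_ definition above) =====
theorem fsum_spec : Claim_equal_fsum := by
  intro a b _
  unfold Spec_fsum
  exact fsum_eq_alt a b
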